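-- pv_equiv track=rewrite | github.com/maojanlin/gAIRRsuite | scripts/check_RSS.py | select_best_RSS
-- ===== SOURCE A (Python) =====
-- def select_best_RSS(interested_list):
--     ranks = [[],[],[],[]]
--     for pair in interested_list:
--         if (pair[0] == 0) and (abs(pair[1]) == 12 or abs(pair[1]) == 23):
--             ranks[0].append(pair)
--         elif pair[0] == 0:
--             ranks[1].append(pair)
--         elif (-10 <= pair[0] <= 10) and (pair[1] == 12 or pair[1] == 23):
--             ranks[2].append(pair)
--         else:
--             ranks[3].append(pair)
--     for idx, sub_rank in enumerate(ranks):
--         if len(sub_rank) > 0: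
--             return idx, sub_rank
--     return 4, interested_list
-- ===== SOURCE B (Python) =====
-- def select_best_RSS(interested_list):
--     def classify(pair):
--         if pair[0] == 0 and (abs(pair[1]) == 12 or abs(pair[1]) == 23):
--             return 0
--         if pair[0] == 0:
--             return 1
--         if -10 <= pair[0] <= 10 and (pair[1] == 12 or pair[1] == 23):
--             return 2
--         return 3
--     if not interested_list:
--         return 4, interested_list
--     ranks = [classify(p) for p in interested_list]
--     best = min(ranks)
--     return best, [p for p, r in zip(interested_list, ranks) if r == best]
-- ===== Notes on version B (the rewrite author's own statement) =====
-- stated objective: simpler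
-- what changed: A maintains four explicit bucket lists in one loop and scans them for the first non-empty; B classifies each pair to a rank 0-3, takes the minimum rank, and filters the pairs with that rank, keeping original order.
import Mathlib
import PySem

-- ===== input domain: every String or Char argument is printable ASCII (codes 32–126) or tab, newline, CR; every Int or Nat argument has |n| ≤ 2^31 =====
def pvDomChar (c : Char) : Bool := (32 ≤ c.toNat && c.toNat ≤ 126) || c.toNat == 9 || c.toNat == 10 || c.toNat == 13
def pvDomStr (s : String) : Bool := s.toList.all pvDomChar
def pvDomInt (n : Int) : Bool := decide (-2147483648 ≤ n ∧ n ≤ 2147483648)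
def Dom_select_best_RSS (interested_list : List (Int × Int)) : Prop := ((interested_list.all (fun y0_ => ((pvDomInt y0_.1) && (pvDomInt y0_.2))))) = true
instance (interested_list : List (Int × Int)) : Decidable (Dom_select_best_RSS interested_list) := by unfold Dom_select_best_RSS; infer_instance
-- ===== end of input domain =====

-- B replaces A's four explicit buckets by a classify-all / take-min-rank / filter decomposition (objective: simpler); same return value.


-- ===== PORT A =====
-- one iteration of A's for-loop: append pair to the bucket selected by the if/elif chain
def selStepRSS (r : List (Int × Int) × List (Int × Int) × List (Int × Int) × List (Int × Int))
    (pair : Int × Int) : List (Int × Int) × List (Int × Int) × List (Int × Int) × List (Int × Int) :=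
  if pair.1 = 0 ∧ (|pair.2| = 12 ∨ |pair.2| = 23) then (r.1 ++ [pair], r.2.1, r.2.2.1, r.2.2.2)
  else if pair.1 = 0 then (r.1, r.2.1 ++ [pair], r.2.2.1, r.2.2.2)
  else if ((-10 : Int) ≤ pair.1 ∧ pair.1 ≤ 10) ∧ (pair.2 = 12 ∨ pair.2 = 23) then (r.1, r.2.1, r.2.2.1 ++ [pair], r.2.2.2)
  else (r.1, r.2.1, r.2.2.1, r.2.2.2 ++ [pair])

def select_best_RSS (interested_list : List (Int × Int)) : Int × (List (Int × Int)) :=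
  let r := interested_list.foldl selStepRSS ([], [], [], [])
  if r.1 ≠ [] then (0, r.1)
  else if r.2.1 ≠ [] then (1, r.2.1)
  else if r.2.2.1 ≠ [] then (2, r.2.2.1)
  else if r.2.2.2 ≠ [] then (3, r.2.2.2)
  else (4, interested_list)

-- ===== PORT B =====
-- Source B's classify(pair): rank 0..3 by the same conditions
def classifyRSS (pair : Int × Int) : Int :=
  if pair.1 = 0 ∧ (|pair.2| = 12 ∨ |pair.2| = 23) then 0
  else if pair.1 = 0 then 1
  else if ((-10 : Int) ≤ pair.1 ∧ pair.1 ≤ 10) ∧ (pair.2 = 12 ∨ pair.2 = 23) then 2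
  else 3

def select_best_RSS_alt (interested_list : List (Int × Int)) : Int × (List (Int × Int)) :=
  match interested_list with
  | [] => (4, interested_list)
  | _ :: _ =>
    let ranks := interested_list.map classifyRSS
    let best := (PySem.List.min? ranks (fun x => x)).getD 0  -- list is nonempty, so min? is some
    (best, ((interested_list.zip ranks).filter (fun pr => pr.2 == best)).map (·.1))

-- ===== PRECONDITION & SPEC =====
def Spec_select_best_RSS (interested_list : List (Int × Int)) (out : Int × (List (Int × Int))) : Prop := out = select_best_RSS_alt interested_list
instance (interested_list : List (Int × Int)) (out : Int × (List (Int × Int))) : Decidable (Spec_select_best_RSS interested_list out) := by unfold Spec_select_best_RSS; infer_instance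

-- ===== CLAIM (what is proved, stated in full; the proofs are below) =====
def Claim_equal_select_best_RSS : Prop := ∀ (interested_list : List (Int × Int)), Dom_select_best_RSS interested_list → Spec_select_best_RSS interested_list (select_best_RSS interested_list)

-- ===== LEMMAS AND PROOFS =====

theorem selStep_classify (r : List (Int × Int) × List (Int × Int) × List (Int × Int) × List (Int × Int))
    (p : Int × Int) :
    selStepRSS r p =
      (r.1 ++ if classifyRSS p == 0 then [p] else [],
       r.2.1 ++ if classifyRSS p == 1 then [p] else [],
       r.2.2.1 ++ if classifyRSS p == 2 then [p] else [],
       r.2.2.2 ++ if classifyRSS p == 3 then [p] else []) := by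
  by_cases h1 : p.1 = 0 ∧ (|p.2| = 12 ∨ |p.2| = 23)
  · simp [selStepRSS, classifyRSS, h1]
  · by_cases h2 : p.1 = 0
    · have hC : ¬(|p.2| = 12 ∨ |p.2| = 23) := fun hC => h1 ⟨h2, hC⟩
      simp [selStepRSS, classifyRSS, h2, hC]
    · by_cases h3 : ((-10 : Int) ≤ p.1 ∧ p.1 ≤ 10) ∧ (p.2 = 12 ∨ p.2 = 23)
      · simp [selStepRSS, classifyRSS, h2, h3]
      · simp [selStepRSS, classifyRSS, h2, h3]


theorem fold_filters (l : List (Int × Int))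
    (a b c d : List (Int × Int)) :
    l.foldl selStepRSS (a, b, c, d) =
      (a ++ l.filter (fun p => classifyRSS p == 0),
       b ++ l.filter (fun p => classifyRSS p == 1),
       c ++ l.filter (fun p => classifyRSS p == 2),
       d ++ l.filter (fun p => classifyRSS p == 3)) := by
  induction l generalizing a b c d with
  | nil => simp
  | cons x t ih =>
    simp only [List.foldl_cons, selStep_classify, ih, List.filter_cons]
    by_cases h0 : classifyRSS x = 0 <;> by_cases h1 : classifyRSS x = 1 <;>
      by_cases h2 : classifyRSS x = 2 <;> by_cases h3 : classifyRSS x = 3 <;>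
      simp_all

theorem classify_cases (p : Int × Int) :
    classifyRSS p = 0 ∨ classifyRSS p = 1 ∨ classifyRSS p = 2 ∨ classifyRSS p = 3 := by
  unfold classifyRSS; split_ifs <;> simp

theorem zip_filter_map (l : List (Int × Int)) (best : Int) :
    ((l.zip (l.map classifyRSS)).filter (fun pr => pr.2 == best)).map (·.1) =
      l.filter (fun p => classifyRSS p == best) := by
  induction l with
  | nil => rfl
  | cons x t ih =>
    simp only [List.map_cons, List.zip_cons_cons, List.filter_cons]
    by_cases h : classifyRSS x == best <;> simp [h, ih]

theorem select_best_RSS_spec : Claim_equal_select_best_RSS := by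
  intro l _
  unfold Spec_select_best_RSS select_best_RSS select_best_RSS_alt
  cases l with
  | nil => rfl
  | cons x t =>
    obtain ⟨m, hm⟩ : ∃ m, PySem.List.min? ((x :: t).map classifyRSS) (fun x => x) = some m := by
      cases h : PySem.List.min? ((x :: t).map classifyRSS) (fun x => x) with
      | none => rw [PySem.List.min?_eq_none_iff] at h; simp at h
      | some m => exact ⟨m, rfl⟩
    have hmem : m ∈ (x :: t).map classifyRSS := PySem.List.min?_mem hm
    have hmin : ∀ y ∈ (x :: t).map classifyRSS, m ≤ y := by
      intro y hy; exact PySem.List.min?_isMin hm y hy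
    obtain ⟨q, hq, hqm⟩ := List.mem_map.mp hmem
    have hne : (x :: t).filter (fun p => classifyRSS p == m) ≠ [] := by
      intro hnil
      have := List.filter_eq_nil_iff.mp hnil q hq
      simp [hqm] at this
    have hbelow : ∀ k : Int, k < m → (x :: t).filter (fun p => classifyRSS p == k) = [] := by
      intro k hk
      apply List.filter_eq_nil_iff.mpr
      intro p hp
      have := hmin (classifyRSS p) (List.mem_map.mpr ⟨p, hp, rfl⟩)
      simp only [beq_iff_eq]
      omega
    simp only [fold_filters, List.nil_append, hm, Option.getD_some, zip_filter_map]
    rcases classify_cases q with h | h | h | h <;> rw [h] at hqm <;> subst hqm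
    · simp [hne]
    · rw [hbelow 0 (by norm_num)]
      simp [hne]
    · rw [hbelow 0 (by norm_num), hbelow 1 (by norm_num)]
      simp [hne]
    · rw [hbelow 0 (by norm_num), hbelow 1 (by norm_num), hbelow 2 (by norm_num)]
      simp [hne]
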